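-- pv_equiv track=rewrite | github.com/Storm1seven/Competitive-Programming | Codeforces/1285/d/d.py | solve
-- ===== SOURCE A (Python) =====
-- def solve(a, bit):
--     if len(a) == 0 or bit < 0:
--         return 0
--     one = []
--     zero = []
--     for i in a:
--         if (i>>bit)&1:
--             one.append(i)
--         else:
--             zero.append(i)
--     if not one:
--         return solve(zero, bit-1)
--     if not zero:
--         return (solve(one, bit-1))
--     return min(solve(one, bit-1), solve(zero, bit-1))+(1<<bit)
-- ===== SOURCE B (Python) =====
-- def solve(a, bit):
--     if not a or bit < 0:
--         return 0
--     root = [None, None]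
--     for x in a:
--         cur = root
--         for lvl in range(bit, -1, -1):
--             b = (x >> lvl) & 1
--             if cur[b] is None:
--                 cur[b] = [None, None]
--             cur = cur[b]
--
--     def dfs(node, lvl):
--         if lvl < 0:
--             return 0
--         left, right = node
--         if left is not None and right is not None:
--             return min(dfs(left, lvl - 1), dfs(right, lvl - 1)) + (1 << lvl)
--         if left is not None:
--             return dfs(left, lvl - 1)
--         return dfs(right, lvl - 1)
--
--     return dfs(root, bit)
-- ===== Notes on version B (the rewrite author's own statement) =====
-- stated objective: alternative
-- what changed: Replaces A's top-down recursion that re-partitions the list at every bit level with building a binary trie once (one iterative insertion pass per element) and a DFS over the trie nodes.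
-- outside the precondition, e.g. on solve([0], 800): A returns 0, B returns 0
import Mathlib
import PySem

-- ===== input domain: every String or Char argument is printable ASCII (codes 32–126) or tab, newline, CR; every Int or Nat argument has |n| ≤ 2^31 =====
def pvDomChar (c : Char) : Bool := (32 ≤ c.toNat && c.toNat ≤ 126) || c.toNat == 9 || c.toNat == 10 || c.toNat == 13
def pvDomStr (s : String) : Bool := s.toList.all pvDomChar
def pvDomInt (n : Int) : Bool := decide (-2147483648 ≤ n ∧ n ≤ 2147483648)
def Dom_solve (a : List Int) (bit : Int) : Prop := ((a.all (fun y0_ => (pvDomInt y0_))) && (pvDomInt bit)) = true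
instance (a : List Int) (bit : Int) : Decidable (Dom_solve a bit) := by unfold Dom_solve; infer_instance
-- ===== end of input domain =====

-- B replaces A's top-down partition recursion by building a binary trie once and folding it with a DFS (alternative data structure, similar cost); equivalence of return values is proved on Pre_solve.

-- shared bit test: Python's `(x >> lvl) & 1` (used verbatim by both sources)
def pvBit (x : Int) (lvl : Nat) : Bool := PySem.Int.band (x >>> lvl) 1 = 1

-- ===== PORT A =====
def solve (a : List Int) (bit : Int) : Int :=
  if a.length = 0 ∨ bit < 0 then 0
  else
    -- the one/zero appending loop
    let oz := a.foldl (fun (oz : List Int × List Int) i =>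
      if pvBit i bit.toNat then (oz.1 ++ [i], oz.2) else (oz.1, oz.2 ++ [i])) ([], [])
    if oz.1 = [] then solve oz.2 (bit - 1)
    else if oz.2 = [] then solve oz.1 (bit - 1)
    else min (solve oz.1 (bit - 1)) (solve oz.2 (bit - 1)) + 2 ^ bit.toNat
termination_by (bit + 1).toNat
decreasing_by all_goals omega

-- ===== PORT B =====
-- Python's `[None, None]` node is `.node`; an absent child (`None`) is `.nil`.
inductive PvTrie : Type
  | nil : PvTrie
  | node : PvTrie → PvTrie → PvTrie
deriving DecidableEq, Repr

def PvTrie.childL : PvTrie → PvTrie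
  | .nil => .nil
  | .node l _ => l

def PvTrie.childR : PvTrie → PvTrie
  | .nil => .nil
  | .node _ r => r

-- `if cur[b] is None: cur[b] = [None, None]`
def PvTrie.orNew : PvTrie → PvTrie
  | .nil => .node .nil .nil
  | .node l r => .node l r

-- the inner `for lvl in range(bit, -1, -1)` insertion loop, fuel = lvl+1
def pvInsert (x : Int) : Nat → PvTrie → PvTrie
  | 0, t => t
  | n+1, t =>
    if pvBit x n then .node t.childL (pvInsert x n t.childR.orNew)
    else .node (pvInsert x n t.childL.orNew) t.childR

-- Python's dfs; second argument = lvl+1 (0 encodes lvl < 0).  The `.nil` row returns 0: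
-- B's dfs is never called on a missing child, so that row is unreachable on the tries B builds.
def pvDfs : PvTrie → Nat → Int
  | _, 0 => 0
  | .nil, _+1 => 0
  | .node l r, n+1 =>
    if l ≠ .nil ∧ r ≠ .nil then min (pvDfs l n) (pvDfs r n) + 2 ^ n
    else if l ≠ .nil then pvDfs l n
    else pvDfs r n

def solve_alt (a : List Int) (bit : Int) : Int :=
  if a = [] ∨ bit < 0 then 0
  else pvDfs (a.foldl (fun t x => pvInsert x (bit.toNat + 1) t) (.node .nil .nil)) (bit.toNat + 1)

-- ===== PRECONDITION & SPEC =====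
-- Pre_ excludes only nonempty inputs with bit > 700, where CPython's default recursion limit
-- makes A raise RecursionError (depth ≈ bit; A raises from bit ≈ 997 at top level; the margin
-- covers harness call depth).  For a = [] or bit < 0 both return 0 at any bit.
def Pre_solve (a : List Int) (bit : Int) : Prop := a = [] ∨ bit ≤ 700
instance (a : List Int) (bit : Int) : Decidable (Pre_solve a bit) := by unfold Pre_solve; infer_instance
def pvWitness_solve : List Int × Int := ([3, 5, 1, 2], 2)

def Spec_solve (a : List Int) (bit : Int) (out : Int) : Prop := out = solve_alt a bit
instance (a : List Int) (bit : Int) (out : Int) : Decidable (Spec_solve a bit out) := by unfold Spec_solve; infer_instance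

-- ===== CLAIM (what is proved, stated in full; the proofs are below) =====
def Claim_equal_solve : Prop := ∀ (a : List Int) (bit : Int), Dom_solve a bit → Pre_solve a bit → Spec_solve a bit (solve a bit)

-- ===== LEMMAS AND PROOFS =====

lemma pv_ne_nil_node {t : PvTrie} (h : t ≠ .nil) : t = .node t.childL t.childR := by
  cases t with
  | nil => exact absurd rfl h
  | node l r => rfl

lemma pv_orNew_of_ne_nil {t : PvTrie} (h : t ≠ .nil) : t.orNew = t := by
  cases t with
  | nil => exact absurd rfl h
  | node l r => rfl

lemma pvInsert_ne_nil (x : Int) (n : Nat) (t : PvTrie) (h : t ≠ .nil) :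
    pvInsert x n t ≠ .nil := by
  cases n with
  | zero => simpa [pvInsert] using h
  | succ m => simp only [pvInsert]; split <;> simp

lemma pvBuild_ne_nil (n : Nat) (a : List Int) (t : PvTrie) (h : t ≠ .nil) :
    a.foldl (fun t x => pvInsert x n t) t ≠ .nil := by
  induction a generalizing t with
  | nil => simpa using h
  | cons x xs ih => exact ih _ (pvInsert_ne_nil x n t h)

lemma pvChildL_insert (x : Int) (n : Nat) (t : PvTrie) :
    (pvInsert x (n+1) t).childL = if pvBit x n then t.childL else pvInsert x n t.childL.orNew := by
  simp only [pvInsert]; split <;> rfl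

lemma pvChildR_insert (x : Int) (n : Nat) (t : PvTrie) :
    (pvInsert x (n+1) t).childR = if pvBit x n then pvInsert x n t.childR.orNew else t.childR := by
  simp only [pvInsert]; split <;> rfl

-- A's appending loop is the two filters
lemma pvPartition (n : Nat) (a : List Int) : ∀ (o z : List Int),
    a.foldl (fun (oz : List Int × List Int) i =>
      if pvBit i n then (oz.1 ++ [i], oz.2) else (oz.1, oz.2 ++ [i])) (o, z)
    = (o ++ a.filter (fun i => pvBit i n), z ++ a.filter (fun i => !pvBit i n)) := by
  induction a with
  | nil => simp
  | cons x xs ih =>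
    intro o z
    by_cases h : pvBit x n <;> simp [h, ih]

-- left/right child of the trie built at fuel n+1: insert the matching filter at fuel n
lemma pvChildL_build (n : Nat) (a : List Int) : ∀ (t : PvTrie),
    (a.foldl (fun t x => pvInsert x (n+1) t) t).childL
    = (a.filter (fun i => !pvBit i n)).foldl (fun c x => pvInsert x n c.orNew) t.childL := by
  induction a with
  | nil => intro t; simp
  | cons x xs ih =>
    intro t
    by_cases h : pvBit x n
    · rw [List.foldl_cons, ih, pvChildL_insert, if_pos h, List.filter_cons]
      simp [h]
    · rw [List.foldl_cons, ih, pvChildL_insert, if_neg h, List.filter_cons]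
      simp [h]

lemma pvChildR_build (n : Nat) (a : List Int) : ∀ (t : PvTrie),
    (a.foldl (fun t x => pvInsert x (n+1) t) t).childR
    = (a.filter (fun i => pvBit i n)).foldl (fun c x => pvInsert x n c.orNew) t.childR := by
  induction a with
  | nil => intro t; simp
  | cons x xs ih =>
    intro t
    by_cases h : pvBit x n
    · rw [List.foldl_cons, ih, pvChildR_insert, if_pos h, List.filter_cons]
      simp [h]
    · rw [List.foldl_cons, ih, pvChildR_insert, if_neg h, List.filter_cons]
      simp [h]

-- once the accumulator is a real node, orNew is the identity
lemma pvGFold_eq (n : Nat) (zs : List Int) : ∀ (c : PvTrie), c ≠ .nil →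
    zs.foldl (fun c x => pvInsert x n c.orNew) c = zs.foldl (fun c x => pvInsert x n c) c := by
  induction zs with
  | nil => intro c _; rfl
  | cons x xs ih =>
    intro c hc
    simp only [List.foldl_cons, pv_orNew_of_ne_nil hc]
    exact ih _ (pvInsert_ne_nil x n c hc)

lemma pvGFold_nil (n : Nat) (zs : List Int) (h : zs ≠ []) :
    zs.foldl (fun c x => pvInsert x n c.orNew) .nil
    = zs.foldl (fun c x => pvInsert x n c) (.node .nil .nil) := by
  cases zs with
  | nil => exact absurd rfl h
  | cons x xs =>
    simp only [List.foldl_cons]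
    show xs.foldl _ (pvInsert x n (PvTrie.orNew .nil)) = _
    have h1 : pvInsert x n (PvTrie.node .nil .nil) ≠ .nil :=
      pvInsert_ne_nil x n _ (by simp)
    calc xs.foldl (fun c x => pvInsert x n c.orNew) (pvInsert x n (PvTrie.orNew .nil))
        = xs.foldl (fun c x => pvInsert x n c.orNew) (pvInsert x n (.node .nil .nil)) := rfl
      _ = xs.foldl (fun c x => pvInsert x n c) (pvInsert x n (.node .nil .nil)) := pvGFold_eq n xs _ h1

lemma pvFilter_cover {a : List Int} (h : a ≠ []) (n : Nat) :
    a.filter (fun i => pvBit i n) ≠ [] ∨ a.filter (fun i => !pvBit i n) ≠ [] := by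
  cases a with
  | nil => exact absurd rfl h
  | cons x xs =>
    by_cases hb : pvBit x n
    · left; simp [hb]
    · right; simp [hb]

-- main bridge: DFS on the trie with fuel n equals A's recursion at bit = n - 1
lemma pvMain (n : Nat) : ∀ (a : List Int), a ≠ [] →
    pvDfs (a.foldl (fun t x => pvInsert x n t) (.node .nil .nil)) n = solve a ((n : Int) - 1) := by
  induction n with
  | zero =>
    intro a ha
    have hfix : ∀ (l : List Int), l.foldl (fun t x => pvInsert x 0 t) (PvTrie.node .nil .nil)
        = PvTrie.node .nil .nil := by
      intro l
      induction l with
      | nil => rfl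
      | cons x xs ih => rw [List.foldl_cons]; exact ih
    rw [hfix a, solve]
    simp [pvDfs]
  | succ n ih =>
    intro a ha
    set os := a.filter (fun i => pvBit i n) with hos
    set zs := a.filter (fun i => !pvBit i n) with hzs
    set T := a.foldl (fun t x => pvInsert x (n+1) t) (PvTrie.node .nil .nil) with hT
    have hTne : T ≠ .nil := pvBuild_ne_nil _ _ _ (by simp)
    have hL : T.childL = zs.foldl (fun c x => pvInsert x n c.orNew) .nil := by
      simpa [PvTrie.childL] using pvChildL_build n a (PvTrie.node .nil .nil)
    have hR : T.childR = os.foldl (fun c x => pvInsert x n c.orNew) .nil := by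
      simpa [PvTrie.childR] using pvChildR_build n a (PvTrie.node .nil .nil)
    -- unfold A at bit = n
    have hlen : ¬((a.length = 0) ∨ ((n : Int)) < 0) := by
      simp [List.length_eq_zero_iff, ha]
    have hcast : (((n + 1 : Nat)) : Int) - 1 = (n : Int) := by push_cast; ring
    have hsolve : solve a (n : Int)
        = (if os = [] then solve zs ((n : Int) - 1)
           else if zs = [] then solve os ((n : Int) - 1)
           else min (solve os ((n : Int) - 1)) (solve zs ((n : Int) - 1)) + 2 ^ n) := by
      rw [solve, if_neg hlen]
      have ht : ((n : Int)).toNat = n := Int.toNat_natCast n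
      simp only [ht, pvPartition n a [] [], List.nil_append, ← hos, ← hzs]
    rw [hcast, pv_ne_nil_node hTne]
    by_cases hzsE : zs = []
    · -- everything went right: only child R
      have hosE : os ≠ [] := by
        rcases pvFilter_cover ha n with h | h
        · exact h
        · exact absurd hzsE h
      have hLnil : T.childL = .nil := by rw [hL, hzsE]; rfl
      have hRv : T.childR = os.foldl (fun c x => pvInsert x n c) (.node .nil .nil) := by
        rw [hR, pvGFold_nil n os hosE]
      have hRne : T.childR ≠ .nil := by
        rw [hRv]; exact pvBuild_ne_nil _ _ _ (by simp)
      rw [hsolve, if_neg hosE, if_pos hzsE]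
      simp only [pvDfs, hLnil]
      rw [if_neg (by simp), if_neg (by simp)]
      rw [hRv]
      exact ih os hosE
    · by_cases hosE : os = []
      · -- only child L
        have hLv : T.childL = zs.foldl (fun c x => pvInsert x n c) (.node .nil .nil) := by
          rw [hL, pvGFold_nil n zs hzsE]
        have hLne : T.childL ≠ .nil := by
          rw [hLv]; exact pvBuild_ne_nil _ _ _ (by simp)
        have hRnil : T.childR = .nil := by rw [hR, hosE]; rfl
        rw [hsolve, if_pos hosE]
        simp only [pvDfs, hRnil]
        rw [if_neg (by simp [hLne]), if_pos hLne]
        rw [hLv]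
        exact ih zs hzsE
      · -- both children
        have hLv : T.childL = zs.foldl (fun c x => pvInsert x n c) (.node .nil .nil) := by
          rw [hL, pvGFold_nil n zs hzsE]
        have hRv : T.childR = os.foldl (fun c x => pvInsert x n c) (.node .nil .nil) := by
          rw [hR, pvGFold_nil n os hosE]
        have hLne : T.childL ≠ .nil := by
          rw [hLv]; exact pvBuild_ne_nil _ _ _ (by simp)
        have hRne : T.childR ≠ .nil := by
          rw [hRv]; exact pvBuild_ne_nil _ _ _ (by simp)
        rw [hsolve, if_neg hosE, if_neg hzsE]
        simp only [pvDfs]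
        rw [if_pos ⟨hLne, hRne⟩, hLv, hRv, ih zs hzsE, ih os hosE, min_comm]

-- ===== VERDICT (by name: the statement is the Claim_ definition above) =====
theorem solve_spec : Claim_equal_solve := by
  intro a bit _ _
  unfold Spec_solve
  by_cases h : a = [] ∨ bit < 0
  · rw [solve]
    have h' : a.length = 0 ∨ bit < 0 := by
      rcases h with h | h
      · left; simp [h]
      · right; exact h
    rw [if_pos h']
    unfold solve_alt
    rw [if_pos h]
  · rw [not_or, Int.not_lt] at h
    obtain ⟨ha, hb⟩ := h
    unfold solve_alt
    rw [if_neg (by rw [not_or, Int.not_lt]; exact ⟨ha, hb⟩)]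
    have := pvMain (bit.toNat + 1) a ha
    rw [this]
    congr 1
    push_cast
    omega
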